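-- pv_equiv track=rewrite | github.com/WyrickM/Programming-Language-Design | HW#3 Python Warmup/HW3.py | searchDicts
-- ===== SOURCE A (Python) =====
-- def searchDicts(L, k):
--     answer = {}
--     L = reversed(L)
--     for index in L:
--         for item in index:
--             answer[item] = index.get(item,0)
--             if item == k:
--                 return answer[item]
-- ===== SOURCE B (Python) =====
-- def searchDicts(L, k):
--     merged = {}
--     for d in L:
--         merged.update(d)
--     return merged.get(k)
-- ===== Notes on version B (the rewrite author's own statement) =====
-- stated objective: simpler
-- what changed: Replaces A's reverse scan over the dicts with an early-return inner key loop by building one merged dict with forward updates (later dicts overwrite earlier keys) and doing a single .get(k) at the end.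
import Mathlib
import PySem

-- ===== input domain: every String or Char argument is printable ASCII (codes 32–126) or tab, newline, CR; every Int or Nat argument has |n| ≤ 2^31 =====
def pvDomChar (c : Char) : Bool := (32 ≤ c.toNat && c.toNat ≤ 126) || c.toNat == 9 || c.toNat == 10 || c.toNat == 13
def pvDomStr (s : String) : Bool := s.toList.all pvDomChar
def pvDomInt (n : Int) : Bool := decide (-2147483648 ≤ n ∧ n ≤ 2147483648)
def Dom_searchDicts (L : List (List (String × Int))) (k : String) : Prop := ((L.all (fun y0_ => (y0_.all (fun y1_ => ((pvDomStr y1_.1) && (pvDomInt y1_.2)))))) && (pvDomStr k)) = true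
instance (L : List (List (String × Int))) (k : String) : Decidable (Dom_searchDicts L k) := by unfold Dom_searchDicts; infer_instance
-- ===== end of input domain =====

-- B replaces A's reverse scan with early return by one forward-merged dict and a single final lookup (objective: simpler).

-- ===== PORT A =====
-- inner loop 'for item in index: answer[item] = index.get(item,0); if item == k: return answer[item]'
-- returns the updated 'answer' and 'some v' iff the loop returned v
def searchInnerA (idx : PySem.Dict String Int) (k : String) :
    PySem.Dict String Int → List (String × Int) → PySem.Dict String Int × Option Int
  | answer, [] => (answer, none)
  | answer, (item, _) :: rest =>
      let answer' := answer.insert item (idx.getD item 0)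
      if item == k then (answer', answer'.get? item)
      else searchInnerA idx k answer' rest

-- outer loop 'for index in reversed(L)'; each Python dict is the PySem.Dict built from its pairs
def searchGoA (k : String) : PySem.Dict String Int → List (List (String × Int)) → Option Int
  | _, [] => none
  | answer, d :: rest =>
      let idx := d.foldl (fun m p => m.insert p.1 p.2) PySem.Dict.empty
      let res := searchInnerA idx k answer idx.items
      match res.2 with
      | some v => some v
      | none => searchGoA k res.1 rest

def searchDicts (L : List (List (String × Int))) (k : String) : Option Int :=
  searchGoA k PySem.Dict.empty L.reverse

-- ===== PORT B =====
def searchDicts_alt (L : List (List (String × Int))) (k : String) : Option Int :=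
  (L.foldl (fun m d => d.foldl (fun m p => m.insert p.1 p.2) m) PySem.Dict.empty).get? k

-- ===== PRECONDITION & SPEC =====
def Spec_searchDicts (L : List (List (String × Int))) (k : String) (out : Option Int) : Prop := out = searchDicts_alt L k
instance (L : List (List (String × Int))) (k : String) (out : Option Int) : Decidable (Spec_searchDicts L k out) := by unfold Spec_searchDicts; infer_instance

-- ===== CLAIM (what is proved, stated in full; the proofs are below) =====
def Claim_equal_searchDicts : Prop := ∀ (L : List (List (String × Int))) (k : String), Dom_searchDicts L k → Spec_searchDicts L k (searchDicts L k)

-- ===== LEMMAS AND PROOFS =====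

-- the inner loop returns 'some (idx.getD k 0)' iff some scanned item's key equals k
lemma searchInnerA_snd (idx : PySem.Dict String Int) (k : String) :
    ∀ (items : List (String × Int)) (answer : PySem.Dict String Int),
      (searchInnerA idx k answer items).2 =
        if items.any (fun p => p.1 == k) then some (idx.getD k 0) else none := by
  intro items
  induction items with
  | nil => intro answer; simp [searchInnerA]
  | cons p rest ih =>
      intro answer
      obtain ⟨item, v⟩ := p
      by_cases h : item = k
      · subst h
        simp [searchInnerA, PySem.Dict.get?_insert_self, PySem.Dict.getD_eq_get?_getD]
      · have hb : (item == k) = false := by simp [h]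
        simp only [searchInnerA, hb, Bool.false_eq_true, if_false, ih, List.any_cons,
          Bool.false_or]

-- merging a pair list into m, then looking up, is the pair list's own dict first, then m
lemma get?_foldl_insert (k : String) :
    ∀ (d : List (String × Int)) (m : PySem.Dict String Int),
      (d.foldl (fun m p => m.insert p.1 p.2) m).get? k =
        ((d.foldl (fun m p => m.insert p.1 p.2) PySem.Dict.empty).get? k).orElse (fun _ => m.get? k) := by
  intro d
  induction d with
  | nil => intro m; simp [PySem.Dict.get?_empty]
  | cons p rest ih =>
      intro m
      simp only [List.foldl_cons]
      rw [ih (m.insert p.1 p.2), ih (PySem.Dict.empty.insert p.1 p.2)]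
      cases (rest.foldl (fun m p => m.insert p.1 p.2) PySem.Dict.empty).get? k with
      | some v => simp [Option.orElse]
      | none =>
          simp only [Option.orElse]
          rw [PySem.Dict.get?_insert, PySem.Dict.get?_insert]
          split <;> simp [PySem.Dict.get?_empty]

-- whether any key of idx.items equals k is whether idx's lookup succeeds
lemma any_items_key (idx : PySem.Dict String Int) (k : String) :
    idx.items.any (fun p => p.1 == k) = (idx.get? k).isSome := by
  rw [← PySem.Dict.contains_eq_isSome_get?]
  cases hc : idx.contains k with
  | true =>
      have hk : k ∈ idx.keys := (PySem.Dict.contains_iff_mem_keys idx k).mp hc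
      simp only [PySem.Dict.keys, List.mem_map] at hk
      obtain ⟨p, hp, hpk⟩ := hk
      simp only [List.any_eq_true]
      exact ⟨p, hp, by simp [hpk]⟩
  | false =>
      have hk : k ∉ idx.keys := by
        intro h
        rw [← PySem.Dict.contains_iff_mem_keys] at h
        simp [h] at hc
      simp only [List.any_eq_false]
      intro p hp
      simp only [beq_iff_eq]
      intro h
      apply hk
      simp only [PySem.Dict.keys]
      exact List.mem_map.mpr ⟨p, hp, h⟩

lemma searchGoA_eq (k : String) :
    ∀ (L : List (List (String × Int))) (answer : PySem.Dict String Int),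
      searchGoA k answer L.reverse =
        (L.foldl (fun m d => d.foldl (fun m p => m.insert p.1 p.2) m) PySem.Dict.empty).get? k := by
  intro L
  induction L using List.reverseRecOn with
  | nil => intro answer; simp [searchGoA, PySem.Dict.get?_empty]
  | append_singleton L' d ih =>
      intro answer
      rw [List.reverse_append]
      simp only [List.reverse_singleton, List.singleton_append, List.foldl_append, List.foldl_cons, List.foldl_nil]
      rw [searchGoA]
      rw [get?_foldl_insert]
      set idx := d.foldl (fun m p => m.insert p.1 p.2) PySem.Dict.empty with hidx
      rw [searchInnerA_snd, any_items_key]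
      cases h : idx.get? k with
      | some v =>
          have hg : idx.getD k 0 = v := by
            rw [PySem.Dict.getD_eq_get?_getD, h]; rfl
          simp [hg, Option.orElse]
      | none =>
          simp only [Option.isSome_none, Bool.false_eq_true, if_false, Option.orElse]
          exact ih _

-- ===== VERDICT (by name: the statement is the Claim_ definition above) =====
theorem searchDicts_spec : Claim_equal_searchDicts := by
  intro L k _
  unfold Spec_searchDicts searchDicts searchDicts_alt
  exact searchGoA_eq k L PySem.Dict.empty
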